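-- pv_equiv track=rewrite | github.com/avli/PyDev.Debugger | _pydevd_bundle/pydevd_utils.py | _extract_variable_nested_braces
-- ===== SOURCE A (Python) =====
-- def _extract_variable_nested_braces(char_iter):
--     expression = []
--     level = 0
--     for c in char_iter:
--         if c == '{':
--             level += 1
--         if c == '}':
--             level -= 1
--         if level == -1:
--             return ''.join(expression).strip()
--         expression.append(c)
--     raise SyntaxError('Unbalanced braces in expression.')
-- ===== SOURCE B (Python) =====
-- def _extract_variable_nested_braces(char_iter):
--     it = iter(char_iter)
--
--     def consume():
--         parts = []
--         for c in it:
--             if c == '{':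
--                 parts.append('{')
--                 parts.append(consume())
--                 parts.append('}')
--             elif c == '}':
--                 return ''.join(parts)
--             else:
--                 parts.append(c)
--         raise SyntaxError('Unbalanced braces in expression.')
--
--     return consume().strip()
-- ===== Notes on version B (the rewrite author's own statement) =====
-- stated objective: alternative
-- what changed: Replaced the flat counter loop (level +1/-1, early return at -1) by recursive descent over the nested-brace structure: an inner consume() shares one iterator, recurses on '{', returns its collected text on '}', and the top level strips once.
import Mathlib
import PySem

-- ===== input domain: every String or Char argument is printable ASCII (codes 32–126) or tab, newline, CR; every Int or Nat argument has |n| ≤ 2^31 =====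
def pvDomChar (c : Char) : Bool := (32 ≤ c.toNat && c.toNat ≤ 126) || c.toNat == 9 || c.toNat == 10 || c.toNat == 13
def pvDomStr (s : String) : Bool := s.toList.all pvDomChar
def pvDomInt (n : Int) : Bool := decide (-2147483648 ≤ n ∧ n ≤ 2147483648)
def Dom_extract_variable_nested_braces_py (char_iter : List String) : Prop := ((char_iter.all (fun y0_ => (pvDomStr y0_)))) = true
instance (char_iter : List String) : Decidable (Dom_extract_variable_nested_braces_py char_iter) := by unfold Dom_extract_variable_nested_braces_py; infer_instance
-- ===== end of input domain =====

-- B is an alternative decomposition (recursive descent over the nested-brace structure instead of a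
-- counter loop), same cost; equivalence is about the RETURN value (A raises SyntaxError where B does:
-- those inputs are outside Pre_).

-- ===== PORT A =====
-- literal port of A's loop: `expression` accumulator, `level` counter, early return when level hits -1;
-- `none` = the final `raise SyntaxError`.
def pvLoopA : List String → List String → Int → Option String
  | [], _, _ => none
  | c :: rest, expr, level =>
    let level1 := if c = "{" then level + 1 else level
    let level2 := if c = "}" then level1 - 1 else level1
    if level2 = -1 then some (PySem.Str.strip (PySem.Str.join "" expr))
    else pvLoopA rest (expr ++ [c]) level2

def extract_variable_nested_braces_py (char_iter : List String) : String :=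
  (pvLoopA char_iter [] 0).getD ""

-- ===== PORT B =====
-- port of B's inner `consume()`: the shared iterator is the remaining list, returned alongside the
-- collected string; `none` = the `raise SyntaxError` when the iterator exhausts.
def pvConsumeB : (l : List String) → Option (String × {r : List String // r.length < l.length})
  | [] => none
  | c :: rest =>
    if c = "{" then
      match pvConsumeB rest with
      | none => none
      | some (inner, ⟨r1, h1⟩) =>
        match pvConsumeB r1 with
        | none => none
        | some (tail, ⟨r2, h2⟩) =>
            some (PySem.Str.join "" ["{", inner, "}", tail], ⟨r2, by simp only [List.length_cons]; omega⟩)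
    else if c = "}" then some ("", ⟨rest, by simp⟩)
    else
      match pvConsumeB rest with
      | none => none
      | some (tail, ⟨r, h⟩) =>
          some (PySem.Str.join "" [c, tail], ⟨r, by simp only [List.length_cons]; omega⟩)
termination_by l => l.length
decreasing_by all_goals (simp only [List.length_cons]; omega)

def extract_variable_nested_braces_py_alt (char_iter : List String) : String :=
  match pvConsumeB char_iter with
  | none => ""
  | some (s, _) => PySem.Str.strip s

-- ===== PRECONDITION & SPEC =====
-- Pre_ excludes exactly the inputs on which A (and B) raise SyntaxError: those with no prefix in
-- which '}'-elements outnumber '{'-elements by one.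
def Pre_extract_variable_nested_braces_py (char_iter : List String) : Prop :=
  ∃ i, i < char_iter.length ∧
    (char_iter.take (i+1)).count "}" = (char_iter.take (i+1)).count "{" + 1
instance (char_iter : List String) : Decidable (Pre_extract_variable_nested_braces_py char_iter) := by unfold Pre_extract_variable_nested_braces_py; infer_instance

def pvWitness_extract_variable_nested_braces_py : List String := [" a", "{", "b", "}", " ", "}"]

def Spec_extract_variable_nested_braces_py (char_iter : List String) (out : String) : Prop := out = extract_variable_nested_braces_py_alt char_iter
instance (char_iter : List String) (out : String) : Decidable (Spec_extract_variable_nested_braces_py char_iter out) := by unfold Spec_extract_variable_nested_braces_py; infer_instance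

-- ===== CLAIM (what is proved, stated in full; the proofs are below) =====
def Claim_equal_extract_variable_nested_braces_py : Prop := ∀ (char_iter : List String), Dom_extract_variable_nested_braces_py char_iter → Pre_extract_variable_nested_braces_py char_iter → Spec_extract_variable_nested_braces_py char_iter (extract_variable_nested_braces_py char_iter)

-- ===== LEMMAS AND PROOFS =====

-- string facts, proved on the toList side
lemma pvJoinChars (ps : List (List Char)) : PySem.Chars.join [] ps = ps.flatten := by
  induction ps with
  | nil => simp [PySem.Chars.join_nil]
  | cons p rest ih =>
    cases rest with
    | nil => simp [PySem.Chars.join_singleton]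
    | cons q t => rw [PySem.Chars.join_cons_cons]; simp [ih]

lemma pvJoin_nil : PySem.Str.join "" [] = "" := by
  apply String.toList_inj.mp; simp

lemma pvJoin2 (a b : String) : PySem.Str.join "" [a, b] = a ++ b := by
  apply String.toList_inj.mp; simp [pvJoinChars]

lemma pvJoin4 (a b c d : String) : PySem.Str.join "" [a, b, c, d] = a ++ b ++ c ++ d := by
  apply String.toList_inj.mp; simp [pvJoinChars]

lemma pvJoin_snoc (expr : List String) (c : String) :
    PySem.Str.join "" (expr ++ [c]) = PySem.Str.join "" expr ++ c := by
  apply String.toList_inj.mp; simp [pvJoinChars]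

-- k+1 sequential `consume()` steps of B, the collected pieces glued with the consumed "}"s
def pvGoBs : Nat → List String → Option (String × List String)
  | 0, l => (pvConsumeB l).map (fun p => (p.1, p.2.val))
  | k+1, l =>
    match pvConsumeB l with
    | none => none
    | some (s, r) => (pvGoBs k r.val).map (fun q => (s ++ "}" ++ q.1, q.2))

lemma pvGoBs_brace (k : Nat) (l : List String) :
    pvGoBs k ("{" :: l) = (pvGoBs (k+1) l).map (fun p => ("{" ++ p.1, p.2)) := by
  induction k generalizing l with
  | zero =>
    simp only [pvGoBs, pvConsumeB]
    cases h1 : pvConsumeB l with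
    | none => simp
    | some p1 =>
      obtain ⟨inner, r1, hr1⟩ := p1
      cases h2 : pvConsumeB r1 with
      | none => simp [h2]
      | some p2 =>
        obtain ⟨tail, r2, hr2⟩ := p2
        simp [h2, pvJoin4, String.append_assoc]
  | succ k ih =>
    simp only [pvGoBs, pvConsumeB]
    cases h1 : pvConsumeB l with
    | none => simp
    | some p1 =>
      obtain ⟨inner, r1, hr1⟩ := p1
      cases h2 : pvConsumeB r1 with
      | none => simp [h2]
      | some p2 =>
        obtain ⟨tail, r2, hr2⟩ := p2
        simp only [h2, Option.map_map]
        cases h3 : pvGoBs k r2 with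
        | none => simp [h3]
        | some q => simp [h3, pvJoin4, String.append_assoc]

lemma pvGoBs_close (k : Nat) (l : List String) :
    pvGoBs (k+1) ("}" :: l) = (pvGoBs k l).map (fun p => ("}" ++ p.1, p.2)) := by
  simp only [pvGoBs, pvConsumeB]
  cases h : pvGoBs k l with
  | none => simp [h]
  | some q => simp [h]

lemma pvGoBs_other (k : Nat) (l : List String) (c : String) (hb : c ≠ "{") (hc : c ≠ "}") :
    pvGoBs k (c :: l) = (pvGoBs k l).map (fun p => (c ++ p.1, p.2)) := by
  cases k with
  | zero =>
    simp only [pvGoBs, pvConsumeB, if_neg hb, if_neg hc]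
    cases h : pvConsumeB l with
    | none => simp
    | some p => simp [pvJoin2]
  | succ k =>
    simp only [pvGoBs, pvConsumeB, if_neg hb, if_neg hc]
    cases h : pvConsumeB l with
    | none => simp
    | some p =>
      obtain ⟨s, r, hr⟩ := p
      simp only [Option.map_map]
      cases h2 : pvGoBs k r with
      | none => simp
      | some q => simp [pvJoin2, String.append_assoc]

-- step equations for A's loop
lemma pvLoopA_brace (rest : List String) (expr : List String) (level : Int) :
    pvLoopA ("{" :: rest) expr level =
      if level + 1 = -1 then some (PySem.Str.strip (PySem.Str.join "" expr))
      else pvLoopA rest (expr ++ ["{"]) (level + 1) := by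
  simp [pvLoopA]

lemma pvLoopA_close (rest : List String) (expr : List String) (level : Int) :
    pvLoopA ("}" :: rest) expr level =
      if level - 1 = -1 then some (PySem.Str.strip (PySem.Str.join "" expr))
      else pvLoopA rest (expr ++ ["}"]) (level - 1) := by
  simp [pvLoopA]

lemma pvLoopA_other (rest : List String) (expr : List String) (level : Int) (c : String)
    (hb : c ≠ "{") (hc : c ≠ "}") :
    pvLoopA (c :: rest) expr level =
      if level = -1 then some (PySem.Str.strip (PySem.Str.join "" expr))
      else pvLoopA rest (expr ++ [c]) level := by
  simp [pvLoopA, hb, hc]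

-- main invariant: A's loop at level k is k+1 sequential B-consumptions
lemma pvLoopA_eq_goBs (l : List String) : ∀ (k : Nat) (expr : List String),
    pvLoopA l expr (k : Int) =
      (pvGoBs k l).map (fun p => PySem.Str.strip (PySem.Str.join "" expr ++ p.1)) := by
  induction l with
  | nil =>
    intro k expr
    cases k <;> simp [pvLoopA, pvGoBs, pvConsumeB]
  | cons c rest ih =>
    intro k expr
    by_cases hb : c = "{"
    · subst hb
      rw [pvGoBs_brace, pvLoopA_brace, if_neg (by omega)]
      have hcast : ((k : Int) + 1) = ((k + 1 : Nat) : Int) := by push_cast; ring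
      rw [hcast, ih (k + 1) (expr ++ ["{"])]
      cases h : pvGoBs (k + 1) rest with
      | none => simp
      | some p => simp [pvJoin_snoc, String.append_assoc]
    · by_cases hc : c = "}"
      · subst hc
        cases k with
        | zero =>
          rw [pvLoopA_close, if_pos (by norm_num)]
          simp only [pvGoBs, pvConsumeB]
          simp
        | succ k =>
          rw [pvGoBs_close, pvLoopA_close, if_neg (by omega)]
          have hcast : ((k + 1 : Nat) : Int) - 1 = ((k : Nat) : Int) := by push_cast; ring
          rw [hcast, ih k (expr ++ ["}"])]
          cases h : pvGoBs k rest with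
          | none => simp
          | some p => simp [pvJoin_snoc, String.append_assoc]
      · rw [pvGoBs_other k rest c hb hc, pvLoopA_other rest expr (k : Int) c hb hc,
          if_neg (by omega), ih k (expr ++ [c])]
        cases h : pvGoBs k rest with
        | none => simp
        | some p => simp [pvJoin_snoc, String.append_assoc]

-- ===== VERDICT (by name: the statement is the Claim_ definition above) =====
theorem extract_variable_nested_braces_py_spec : Claim_equal_extract_variable_nested_braces_py := by
  intro l _ _
  unfold Spec_extract_variable_nested_braces_py
  unfold extract_variable_nested_braces_py extract_variable_nested_braces_py_alt
  have h := pvLoopA_eq_goBs l 0 []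
  simp only [pvGoBs, Nat.cast_zero] at h
  rw [h]
  cases hc : pvConsumeB l with
  | none => simp
  | some p => simp [pvJoin_nil]
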